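-- pv_equiv track=rewrite | github.com/flegh113/FxWordlist | program/all_functions.py | generate_all_maj
-- ===== SOURCE A (Python) =====
-- def generate_all_maj(passwd, remaining_replacements, global_passwords):
--     all_maj_set = set()
--     queue = [(passwd, 0, remaining_replacements)]
--     while queue:
--         current_passwd, index, remaining_replacements = queue.pop()
--
--         if current_passwd not in all_maj_set and current_passwd not in global_passwords:
--             all_maj_set.add(current_passwd)
--
--         if remaining_replacements > 0:
--             for i in range(index, len(current_passwd)):
--                 char = current_passwd[i]
--                 if char.islower():
--                     new_passwd = current_passwd[:i] + char.upper() + current_passwd[i + 1:]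
--                     queue.append((new_passwd, i + 1, remaining_replacements - 1))
--
--     return all_maj_set
-- ===== SOURCE B (Python) =====
-- def generate_all_maj(passwd, remaining_replacements, global_passwords):
--     # DP over suffixes: table[b] lists all variants of the current suffix with
--     # at most b of its lowercase letters uppercased (lowercase-first order).
--     low_total = sum(1 for c in passwd if c.islower())
--     cap = max(0, min(remaining_replacements, low_total))
--     table = [[''] for _ in range(cap + 1)]
--     for c in reversed(passwd):
--         if c.islower():
--             u = c.upper()
--             table = [[c + t for t in table[b]] +
--                      ([u + t for t in table[b - 1]] if b > 0 else [])
--                      for b in range(cap + 1)]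
--         else:
--             table = [[c + t for t in tb] for tb in table]
--     return {v for v in table[cap] if v not in global_passwords}
-- ===== Notes on version B (the rewrite author's own statement) =====
-- stated objective: alternative
-- what changed: Replaced the explicit-stack DFS that re-slices the string at every node with a single right-to-left dynamic-programming pass building, per replacement budget b <= min(remaining,#lowercase), the list of suffix variants, then filtering against global_passwords once.
import Mathlib
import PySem

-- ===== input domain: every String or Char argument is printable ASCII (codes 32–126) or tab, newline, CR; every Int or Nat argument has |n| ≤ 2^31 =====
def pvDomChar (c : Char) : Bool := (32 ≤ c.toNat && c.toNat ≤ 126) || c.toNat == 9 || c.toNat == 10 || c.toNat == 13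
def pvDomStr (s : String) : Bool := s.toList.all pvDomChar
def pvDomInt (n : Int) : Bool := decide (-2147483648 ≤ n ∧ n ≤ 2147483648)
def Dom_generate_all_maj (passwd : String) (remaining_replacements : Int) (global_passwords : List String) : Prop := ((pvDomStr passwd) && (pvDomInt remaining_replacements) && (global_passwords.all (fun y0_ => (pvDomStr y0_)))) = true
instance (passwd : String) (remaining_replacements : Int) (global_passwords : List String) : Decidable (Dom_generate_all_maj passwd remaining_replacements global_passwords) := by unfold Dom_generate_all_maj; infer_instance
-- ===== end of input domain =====

-- B replaces A's explicit-stack DFS (which re-slices the string at every node) by one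
-- right-to-left DP pass over the string, building per replacement budget the list of
-- suffix variants; same returned set, objective: alternative algorithm.

-- ===== PORT A =====
-- A, transliterated: a LIFO queue of (current_passwd, index, remaining_replacements),
-- popped from the end; `char.upper()` on a single ASCII char is `upperChar`.
def ajChild (cp : String) (i : Int) (c : Char) : String :=
  PySem.Str.slice cp none (some i) ++ String.ofList [PySem.Chars.upperChar c] ++
    PySem.Str.slice cp (some (i + 1)) none

-- what one index `i` of the for-loop appends to the queue
def ajChildOut (cp : String) (rem : Int) (i : Int) : List (String × Int × Int) :=
  match PySem.Str.pyGet? cp i with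
  | some c => if PySem.Chars.islower c then [(ajChild cp i c, i + 1, rem - 1)] else []
  | none => []

-- the `for i in range(index, len(current_passwd))` loop appending to the queue
def ajPush (cp : String) (idx rem : Int) (q : List (String × Int × Int)) :
    List (String × Int × Int) :=
  (PySem.List.pyRange idx (PySem.Str.len cp)).foldl (fun acc i => acc ++ ajChildOut cp rem i) q

-- termination measure for the while-loop (used only by `decreasing_by`)
def ajItemM (it : String × Int × Int) : Nat :=
  if 0 < it.2.2 then
    2 ^ (3 * (2 * it.1.toList.length + 2 + (-it.2.1).toNat) * 3 ^ (it.2.2 - 1).toNat)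
  else 1

def ajM (q : List (String × Int × Int)) : Nat := (q.map ajItemM).sum

lemma pop?_inv {α : Type} (q : List α) (a : α) (r : List α)
    (h : PySem.List.pop? q = some (a, r)) : q = r ++ [a] := by
  induction q using List.reverseRecOn with
  | nil => simp [PySem.List.pop?, PySem.List.pyIdx?] at h
  | append_singleton xs x ih =>
      rw [PySem.List.pop?_last] at h
      simp_all

lemma ajPush_eq (cp : String) (idx rem : Int) (q : List (String × Int × Int)) :
    ajPush cp idx rem q =
      q ++ (PySem.List.pyRange idx (PySem.Str.len cp)).flatMap (ajChildOut cp rem) :=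
  PySem.List.foldl_append_eq_flatMap _ _ _

lemma ajM_append (a b : List (String × Int × Int)) : ajM (a ++ b) = ajM a + ajM b := by
  simp [ajM]

lemma ajM_flatMap (g : Int → List (String × Int × Int)) (R : List Int) :
    ajM (R.flatMap g) = (R.map (fun i => ajM (g i))).sum := by
  induction R with
  | nil => simp [ajM]
  | cons i R ih => simp [List.flatMap_cons, ajM_append, ih]

lemma ajChild_len_le (cp : String) (i : Int) (c : Char) :
    (ajChild cp i c).toList.length ≤ 2 * cp.toList.length + 1 := by
  unfold ajChild
  rw [String.toList_append, String.toList_append]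
  simp only [List.length_append, String.toList_ofList, List.length_singleton]
  have h1 : (PySem.Str.slice cp none (some i)).toList.length ≤ cp.toList.length := by
    rw [PySem.Str.toList_slice, PySem.Chars.slice_eq_listSlice, ← PySem.List.slice_zero_start,
      PySem.List.length_slice]
    have := PySem.List.clampIdx_le cp.toList.length i
    omega
  have h2 : (PySem.Str.slice cp (some (i + 1)) none).toList.length ≤ cp.toList.length := by
    rw [PySem.Str.toList_slice, PySem.Chars.slice_eq_listSlice, PySem.List.slice_some_none,
      List.length_drop]
    omega
  omega

lemma ajM_decrease (cp : String) (idx rem : Int) (rest : List (String × Int × Int)) :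
    ajM (if 0 < rem then ajPush cp idx rem rest else rest) < ajM (rest ++ [(cp, idx, rem)]) := by
  by_cases hr : 0 < rem
  · rw [if_pos hr, ajPush_eq, ajM_append, ajM_append]
    have hkey : ajM ((PySem.List.pyRange idx (PySem.Str.len cp)).flatMap (ajChildOut cp rem)) <
        ajItemM (cp, idx, rem) := by
      set len := cp.toList.length with hlen
      set E := 2 * len + 2 + (-idx).toNat with hE
      set T := 3 ^ (rem - 1).toNat with hT
      have hT1 : 1 ≤ T := Nat.one_le_pow _ _ (by norm_num)
      have hchild : ∀ i ∈ PySem.List.pyRange idx (PySem.Str.len cp),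
          ajM (ajChildOut cp rem i) ≤ 2 ^ (2 * E * T) := by
        intro i hi
        obtain ⟨hi1, hi2⟩ := PySem.List.mem_pyRange_one.mp hi
        unfold ajChildOut
        cases hg : PySem.Str.pyGet? cp i with
        | none => simp [ajM]
        | some c =>
          by_cases hl : PySem.Chars.islower c
          · simp only [hl, if_pos, ajM, List.map, List.sum_cons, List.sum_nil, Nat.add_zero]
            show ajItemM (ajChild cp i c, i + 1, rem - 1) ≤ 2 ^ (2 * E * T)
            unfold ajItemM
            by_cases hr2 : 0 < rem - 1
            · rw [if_pos hr2]
              simp only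
              have hlc : (ajChild cp i c).toList.length ≤ 2 * len + 1 := ajChild_len_le cp i c
              have hnegi : (-(i + 1)).toNat ≤ (-idx).toNat := by omega
              have hE' : 2 * (ajChild cp i c).toList.length + 2 + (-(i + 1)).toNat ≤ 2 * E := by
                omega
              have hexp : (3 : Nat) * (2 * (ajChild cp i c).toList.length + 2 + (-(i + 1)).toNat) *
                  3 ^ (rem - 1 - 1).toNat ≤ 2 * E * T := by
                have h3 : (3 : Nat) ^ ((rem - 1 - 1).toNat + 1) = 3 * 3 ^ (rem - 1 - 1).toNat := by
                  ring
                have ht : (rem - 1).toNat = (rem - 1 - 1).toNat + 1 := by omega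
                calc 3 * (2 * (ajChild cp i c).toList.length + 2 + (-(i + 1)).toNat) *
                      3 ^ (rem - 1 - 1).toNat
                    ≤ 3 * (2 * E) * 3 ^ (rem - 1 - 1).toNat := by
                      have := Nat.mul_le_mul_right (3 ^ (rem - 1 - 1).toNat)
                        (Nat.mul_le_mul_left 3 hE')
                      omega
                  _ = 2 * E * (3 * 3 ^ (rem - 1 - 1).toNat) := by ring
                  _ = 2 * E * T := by rw [hT, ht, pow_succ]; ring
              exact Nat.pow_le_pow_right (by norm_num) hexp
            · rw [if_neg hr2]
              exact Nat.one_le_two_pow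
          · simp [hl, ajM]
      have hflat : ajM ((PySem.List.pyRange idx (PySem.Str.len cp)).flatMap (ajChildOut cp rem)) ≤
          (PySem.List.pyRange idx (PySem.Str.len cp)).length * 2 ^ (2 * E * T) := by
        rw [ajM_flatMap]
        have := List.sum_le_card_nsmul
          ((PySem.List.pyRange idx (PySem.Str.len cp)).map (fun i => ajM (ajChildOut cp rem i)))
          (2 ^ (2 * E * T)) (by
            intro x hx
            obtain ⟨i, hi, rfl⟩ := List.mem_map.mp hx
            exact hchild i hi)
        simpa [smul_eq_mul] using this
      have hcount : (PySem.List.pyRange idx (PySem.Str.len cp)).length ≤ E := by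
        rw [PySem.List.length_pyRange_one, PySem.Str.len_eq]
        omega
      have hEC : E * 2 ^ (2 * E * T) < 2 ^ (3 * E * T) := by
        have h1 : E < 2 ^ (E * T) := by
          calc E < 2 ^ E := Nat.lt_two_pow_self
            _ ≤ 2 ^ (E * T) := Nat.pow_le_pow_right (by norm_num)
                  (Nat.le_mul_of_pos_right E (by positivity))
        calc E * 2 ^ (2 * E * T) < 2 ^ (E * T) * 2 ^ (2 * E * T) :=
              Nat.mul_lt_mul_of_lt_of_le h1 (le_refl _) (by positivity)
          _ = 2 ^ (3 * E * T) := by rw [← pow_add]; ring_nf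
      have hitem : ajItemM (cp, idx, rem) = 2 ^ (3 * E * T) := by
        unfold ajItemM; rw [if_pos hr]
      calc ajM ((PySem.List.pyRange idx (PySem.Str.len cp)).flatMap (ajChildOut cp rem))
          ≤ (PySem.List.pyRange idx (PySem.Str.len cp)).length * 2 ^ (2 * E * T) := hflat
        _ ≤ E * 2 ^ (2 * E * T) := Nat.mul_le_mul_right _ hcount
        _ < 2 ^ (3 * E * T) := hEC
        _ = ajItemM (cp, idx, rem) := hitem.symm
    have : ajM [(cp, idx, rem)] = ajItemM (cp, idx, rem) := by simp [ajM]
    omega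
  · rw [if_neg hr, ajM_append]
    have : ajItemM (cp, idx, rem) = 1 := by unfold ajItemM; rw [if_neg hr]
    have h1 : ajM [(cp, idx, rem)] = 1 := by simp [ajM, this]
    omega

-- the `while queue:` loop; state = (queue, all_maj_set)
def ajLoop (gp : List String) (q : List (String × Int × Int)) (s : List String) : List String :=
  match hq : PySem.List.pop? q with
  | none => s
  | some ((cp, idx, rem), rest) =>
      ajLoop gp (if 0 < rem then ajPush cp idx rem rest else rest)
        (if !(PySem.Set.contains s cp) && !(gp.contains cp) then PySem.Set.add s cp else s)
termination_by ajM q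
decreasing_by
  rw [pop?_inv q _ _ hq]
  exact ajM_decrease cp idx rem rest

def generate_all_maj (passwd : String) (remaining_replacements : Int)
    (global_passwords : List String) : List String :=
  ajLoop global_passwords [(passwd, 0, remaining_replacements)] PySem.Set.empty

-- ===== PORT B =====
-- B, transliterated (strings kept as their char lists while the table is built,
-- converted back at the end): one right-to-left pass; table[b] = variants of the
-- current suffix with at most b lowercase letters uppercased.
def bStep (cap : Nat) (c : Char) (table : List (List (List Char))) : List (List (List Char)) :=
  if PySem.Chars.islower c then
    (List.range (cap + 1)).map (fun b =>
      ((table.getD b []).map (fun t => c :: t)) ++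
        (if 0 < b then (table.getD (b - 1) []).map (fun t => PySem.Chars.upperChar c :: t)
         else []))
  else table.map (fun tb => tb.map (fun t => c :: t))

def generate_all_maj_alt (passwd : String) (remaining_replacements : Int)
    (global_passwords : List String) : List String :=
  let cs := passwd.toList
  let low : Int := (cs.countP (fun c => PySem.Chars.islower c) : Int)
  let cap : Nat := (max 0 (min remaining_replacements low)).toNat
  let table := cs.reverse.foldl (fun tb c => bStep cap c tb) (List.replicate (cap + 1) [[]])
  PySem.Set.ofList
    (((table.getD cap []).map String.ofList).filter (fun v => !(global_passwords.contains v)))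

-- ===== PRECONDITION & SPEC =====
def Spec_generate_all_maj (passwd : String) (remaining_replacements : Int) (global_passwords : List String) (out : List String) : Prop := out = generate_all_maj_alt passwd remaining_replacements global_passwords
instance (passwd : String) (remaining_replacements : Int) (global_passwords : List String) (out : List String) : Decidable (Spec_generate_all_maj passwd remaining_replacements global_passwords out) := by unfold Spec_generate_all_maj; infer_instance

-- ===== CLAIM (what is proved, stated in full; the proofs are below) =====
def Claim_equal_generate_all_maj : Prop := ∀ (passwd : String) (remaining_replacements : Int) (global_passwords : List String), Dom_generate_all_maj passwd remaining_replacements global_passwords → Spec_generate_all_maj passwd remaining_replacements global_passwords (generate_all_maj passwd remaining_replacements global_passwords)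

-- ===== LEMMAS AND PROOFS =====

-- variants of a suffix with an Int replacement budget, original letter first
def fI : List Char → Int → List (List Char)
  | [], _ => [[]]
  | c :: cs, r =>
      if PySem.Chars.islower c ∧ 0 < r then
        (fI cs r).map (fun t => c :: t) ++ (fI cs (r - 1)).map (fun t => PySem.Chars.upperChar c :: t)
      else (fI cs r).map (fun t => c :: t)

-- the set-accumulating fold both ports reduce to
def sFold (gp : List String) (L : List String) (s : List String) : List String :=
  L.foldl (fun s v => if !(PySem.Set.contains s v) && !(gp.contains v) then PySem.Set.add s v else s) s

lemma ajLoop_nil (gp : List String) (s : List String) : ajLoop gp [] s = s := by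
  rw [ajLoop]
  split
  · rfl
  · rename_i hq
    simp [PySem.List.pop?, PySem.List.pyIdx?] at hq

lemma ajLoop_concat (gp : List String) (q : List (String × Int × Int)) (cp : String)
    (idx rem : Int) (s : List String) :
    ajLoop gp (q ++ [(cp, idx, rem)]) s =
      ajLoop gp (if 0 < rem then ajPush cp idx rem q else q)
        (if !(PySem.Set.contains s cp) && !(gp.contains cp) then PySem.Set.add s cp else s) := by
  rw [ajLoop]
  split
  · rename_i hq
    rw [PySem.List.pop?_last] at hq
    exact absurd hq (by simp)
  · rename_i cp' idx' rem' rest' hq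
    rw [PySem.List.pop?_last] at hq
    simp only [Option.some.injEq, Prod.mk.injEq] at hq
    obtain ⟨⟨h1, h2, h3⟩, h4⟩ := hq
    subst h1; subst h2; subst h3; subst h4
    rfl

lemma ajLoop_append (gp : List String) (q1 q2 : List (String × Int × Int)) (s : List String) :
    ajLoop gp (q1 ++ q2) s = ajLoop gp q1 (ajLoop gp q2 s) := by
  generalize hm : ajM q2 = m
  induction m using Nat.strong_induction_on generalizing q2 s with
  | _ m ih =>
    rcases List.eq_nil_or_concat q2 with rfl | ⟨r2, ⟨cp, idx, rem⟩, rfl⟩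
    · rw [List.append_nil, ajLoop_nil]
    · rw [List.concat_eq_append] at hm ⊢
      rw [← List.append_assoc, ajLoop_concat, ajLoop_concat]
      have hdec := ajM_decrease cp idx rem r2
      by_cases hr : 0 < rem
      · rw [if_pos hr] at hdec
        rw [ajPush_eq] at hdec
        rw [if_pos hr, if_pos hr, ajPush_eq, ajPush_eq, List.append_assoc]
        exact ih _ (hm ▸ hdec) _ _ rfl
      · rw [if_neg hr] at hdec
        rw [if_neg hr, if_neg hr]
        exact ih _ (hm ▸ hdec) _ _ rfl

-- one unfolding of the loop on a singleton queue
lemma visit_unfold (gp : List String) (cp : String) (idx rem : Int) (s : List String) :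
    ajLoop gp [(cp, idx, rem)] s =
      ajLoop gp
        (if 0 < rem then (PySem.List.pyRange idx (PySem.Str.len cp)).flatMap (ajChildOut cp rem)
         else [])
        (if !(PySem.Set.contains s cp) && !(gp.contains cp) then PySem.Set.add s cp else s) := by
  have := ajLoop_concat gp [] cp idx rem s
  rw [List.nil_append] at this
  rw [this, ajPush_eq]
  by_cases hr : 0 < rem
  · rw [if_pos hr, if_pos hr, List.nil_append]
  · rw [if_neg hr, if_neg hr]

lemma sFold_append (gp : List String) (L1 L2 : List String) (s : List String) :
    sFold gp (L1 ++ L2) s = sFold gp L2 (sFold gp L1 s) :=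
  List.foldl_append

lemma fI_nonpos (cs : List Char) (r : Int) (h : r ≤ 0) : fI cs r = [cs] := by
  induction cs with
  | nil => rfl
  | cons c cs ih =>
      rw [fI, if_neg (by intro hc; omega), ih]
      rfl

lemma fI_ge (cs : List Char) (r : Int)
    (h : (cs.countP (fun c => PySem.Chars.islower c) : Int) ≤ r) :
    fI cs r = fI cs (cs.countP (fun c => PySem.Chars.islower c)) := by
  induction cs generalizing r with
  | nil => rfl
  | cons c cs ih =>
      rw [List.countP_cons] at h ⊢
      by_cases hl : PySem.Chars.islower c
      · simp only [hl, if_pos] at h ⊢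
        push_cast at h ⊢
        have hcnt : ((cs.countP (fun c => PySem.Chars.islower c) : Int)) ≤ r - 1 := by omega
        rw [fI, fI, if_pos ⟨hl, by omega⟩, if_pos ⟨hl, by omega⟩]
        rw [ih r (by omega), ih (r - 1) (by omega),
          ih ((cs.countP (fun c => PySem.Chars.islower c) : Int) + 1) (by omega)]
        norm_num
      · simp only [hl, Bool.false_eq_true, if_false] at h ⊢
        rw [fI, fI, if_neg (by intro hc; exact hl hc.1), if_neg (by intro hc; exact hl hc.1)]
        simp only [add_zero] at h ⊢
        rw [ih r h]

lemma upperChar_ne (c : Char) (h : PySem.Chars.islower c = true) : PySem.Chars.upperChar c ≠ c := by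
  unfold PySem.Chars.upperChar
  rw [if_pos h]
  unfold PySem.Chars.islower at h
  simp only [Bool.and_eq_true, decide_eq_true_eq, Char.le_def] at h
  have hb : 97 ≤ c.toNat ∧ c.toNat ≤ 122 := by
    obtain ⟨h1, h2⟩ := h
    unfold Char.toNat
    exact ⟨h1, h2⟩
  intro heq
  have hv : (Char.ofNat (c.toNat - 32)).toNat = c.toNat - 32 := by
    rw [Char.toNat_ofNat, if_pos]
    left
    omega
  rw [heq] at hv
  omega

lemma fI_nodup (cs : List Char) (r : Int) : (fI cs r).Nodup := by
  induction cs generalizing r with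
  | nil => simp [fI]
  | cons c cs ih =>
      rw [fI]
      split
      · rename_i hc
        refine List.Nodup.append ((ih r).map (by intro a b hab; simpa using hab))
          ((ih (r - 1)).map (by intro a b hab; simpa using hab)) ?_
        intro x hx hy
        obtain ⟨t1, _, rfl⟩ := List.mem_map.mp hx
        obtain ⟨t2, _, heq⟩ := List.mem_map.mp hy
        have : PySem.Chars.upperChar c = c := by
          have := heq
          simp only [List.cons.injEq] at this
          exact this.1
        exact upperChar_ne c (by exact_mod_cast hc.1) this
      · exact (ih r).map (by intro a b hab; simpa using hab)

-- the main DFS characterisation: visiting one stack item folds in exactly the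
-- variants of the suffix after `pre`, in fI order
lemma visit_main (gp : List String) (suf : List Char) :
    ∀ (pre : List Char) (rem : Int) (s : List String),
      ajLoop gp [(String.ofList (pre ++ suf), (pre.length : Int), rem)] s =
        sFold gp ((fI suf rem).map (fun t => String.ofList (pre ++ t))) s := by
  induction suf with
  | nil =>
      intro pre rem s
      rw [visit_unfold]
      have h1 : PySem.Str.len (String.ofList (pre ++ [])) = (pre.length : Int) := by
        rw [PySem.Str.len_eq, String.toList_ofList]
        simp
      rw [h1, PySem.List.pyRange_one_eq_nil le_rfl]
      simp only [List.flatMap_nil, ite_self]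
      rw [ajLoop_nil]
      simp [fI, sFold]
  | cons c cs ih =>
      intro pre rem s
      have hlen : PySem.Str.len (String.ofList (pre ++ c :: cs)) =
          ((pre.length + (cs.length + 1) : Nat) : Int) := by
        rw [PySem.Str.len_eq, String.toList_ofList]
        push_cast [List.length_append, List.length_cons]
        ring
      by_cases hr : 0 < rem
      · rw [visit_unfold, if_pos hr, hlen,
          PySem.List.pyRange_one_cons (by push_cast; omega), List.flatMap_cons, ajLoop_append]
        have hrest : ajLoop gp
            ((PySem.List.pyRange ((pre.length : Int) + 1)
                ((pre.length + (cs.length + 1) : Nat) : Int)).flatMap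
              (ajChildOut (String.ofList (pre ++ c :: cs)) rem))
            (if !(PySem.Set.contains s (String.ofList (pre ++ c :: cs))) &&
                !(gp.contains (String.ofList (pre ++ c :: cs)))
             then PySem.Set.add s (String.ofList (pre ++ c :: cs)) else s) =
            sFold gp ((fI cs rem).map (fun t => String.ofList ((pre ++ [c]) ++ t))) s := by
          have hv := visit_unfold gp (String.ofList (pre ++ c :: cs)) ((pre.length : Int) + 1) rem s
          rw [if_pos hr, hlen] at hv
          have hmain := ih (pre ++ [c]) rem s
          rw [show ((pre ++ [c]).length : Int) = (pre.length : Int) + 1 by simp] at hmain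
          rw [show (pre ++ [c]) ++ cs = pre ++ c :: cs by simp] at hmain
          exact hv.symm.trans hmain
        rw [hrest]
        have hget : PySem.Str.pyGet? (String.ofList (pre ++ c :: cs)) (pre.length : Int) = some c := by
          rw [PySem.Str.pyGet?_natCast, String.toList_ofList]
          simp
        by_cases hl : PySem.Chars.islower c
        · have hchout : ajChildOut (String.ofList (pre ++ c :: cs)) rem (pre.length : Int) =
              [(ajChild (String.ofList (pre ++ c :: cs)) (pre.length : Int) c,
                (pre.length : Int) + 1, rem - 1)] := by
            unfold ajChildOut
            rw [hget]
            simp [hl]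
          have hchild : ajChild (String.ofList (pre ++ c :: cs)) (pre.length : Int) c =
              String.ofList ((pre ++ [PySem.Chars.upperChar c]) ++ cs) := by
            apply String.toList_inj.mp
            unfold ajChild
            rw [String.toList_append, String.toList_append, PySem.Str.toList_slice,
              PySem.Str.toList_slice, PySem.Chars.slice_eq_listSlice,
              PySem.Chars.slice_eq_listSlice, String.toList_ofList, String.toList_ofList,
              String.toList_ofList]
            rw [PySem.List.slice_to_natCast, List.take_left]
            rw [show (pre.length : Int) + 1 = ((pre.length + 1 : Nat) : Int) by push_cast; ring,
              PySem.List.slice_from_natCast]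
            have hdrop : (pre ++ c :: cs).drop (pre.length + 1) = cs := by
              rw [show pre ++ c :: cs = (pre ++ [c]) ++ cs by simp,
                show pre.length + 1 = (pre ++ [c]).length by simp]
              exact List.drop_left
            rw [hdrop]
          rw [hchout, hchild]
          have hmain2 := ih (pre ++ [PySem.Chars.upperChar c]) (rem - 1)
            (sFold gp ((fI cs rem).map (fun t => String.ofList ((pre ++ [c]) ++ t))) s)
          rw [show ((pre ++ [PySem.Chars.upperChar c]).length : Int) = (pre.length : Int) + 1
            by simp] at hmain2
          rw [hmain2]
          rw [fI, if_pos ⟨hl, hr⟩, List.map_append, sFold_append, List.map_map, List.map_map]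
          have e1 : ((fI cs rem).map ((fun t => String.ofList (pre ++ t)) ∘ (fun t => c :: t))) =
              (fI cs rem).map (fun t => String.ofList ((pre ++ [c]) ++ t)) := by
            apply List.map_congr_left
            intro t _
            simp
          have e2 : ((fI cs (rem - 1)).map
                ((fun t => String.ofList (pre ++ t)) ∘ (fun t => PySem.Chars.upperChar c :: t))) =
              (fI cs (rem - 1)).map
                (fun t => String.ofList ((pre ++ [PySem.Chars.upperChar c]) ++ t)) := by
            apply List.map_congr_left
            intro t _
            simp
          rw [e1, e2]
        · have hchout : ajChildOut (String.ofList (pre ++ c :: cs)) rem (pre.length : Int) = [] := by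
            unfold ajChildOut
            rw [hget]
            simp [hl]
          rw [hchout, ajLoop_nil, fI, if_neg (fun hc => hl hc.1), List.map_map]
          apply congrArg (fun L => sFold gp L s) ?_ |>.symm
          apply List.map_congr_left
          intro t _
          simp
      · rw [visit_unfold, if_neg hr, ajLoop_nil, fI_nonpos _ rem (by omega)]
        simp [sFold]

lemma sFold_eq_filter (gp : List String) (L : List String) :
    ∀ (acc : List String), L.Nodup → (∀ x ∈ L, acc.contains x = false) →
      sFold gp L acc = acc ++ L.filter (fun v => !(gp.contains v)) := by
  induction L with
  | nil => intro acc _ _; simp [sFold]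
  | cons v L ih =>
      intro acc hnd hacc
      have hvacc : acc.contains v = false := hacc v (List.mem_cons_self)
      have hnd' : L.Nodup := hnd.of_cons
      have hvL : v ∉ L := (List.nodup_cons.mp hnd).1
      rw [sFold, List.foldl_cons]
      by_cases hg : gp.contains v
      · have hgm : v ∈ gp := by simpa using hg
        have hcond : (!(PySem.Set.contains acc v) && !(gp.contains v)) = false := by
          simp [hgm]
        rw [hcond, if_neg (by simp)]
        rw [show (L.foldl (fun s v => if !(PySem.Set.contains s v) && !(gp.contains v)
              then PySem.Set.add s v else s) acc) = sFold gp L acc from rfl]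
        rw [ih acc hnd' (fun x hx => hacc x (List.mem_cons_of_mem _ hx))]
        rw [List.filter_cons, if_neg (by simp [hgm])]
      · have hgm : v ∉ gp := by simpa using hg
        have hvm : v ∉ acc := by simpa using hvacc
        have hcond : (!(PySem.Set.contains acc v) && !(gp.contains v)) = true := by
          simp [PySem.Set.contains, hvm, hgm]
        rw [hcond, if_pos rfl]
        have hadd : PySem.Set.add acc v = acc ++ [v] := by
          unfold PySem.Set.add
          rw [if_neg (by simp [PySem.Set.contains, hvm])]
        rw [hadd]
        rw [show ((L.foldl (fun s v => if !(PySem.Set.contains s v) && !(gp.contains v)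
              then PySem.Set.add s v else s) (acc ++ [v]))) = sFold gp L (acc ++ [v]) from rfl]
        rw [ih (acc ++ [v]) hnd' ?side]
        · rw [List.filter_cons, if_pos (by simp [hgm]), List.append_assoc]
          rfl
        case side =>
          intro x hx
          have h1 := hacc x (List.mem_cons_of_mem _ hx)
          have h2 : x ≠ v := fun he => hvL (he ▸ hx)
          have h1' : x ∉ acc := by simpa using h1
          simp [h1', h2]

lemma bTable (cap : Nat) (cs : List Char) :
    cs.reverse.foldl (fun tb c => bStep cap c tb) (List.replicate (cap + 1) [[]]) =
      (List.range (cap + 1)).map (fun b : Nat => fI cs (b : Int)) := by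
  rw [List.foldl_reverse]
  induction cs with
  | nil =>
      simp only [List.foldr_nil, fI]
      rw [List.map_const']
      simp
  | cons c cs ih =>
      rw [List.foldr_cons, ih]
      unfold bStep
      by_cases hl : PySem.Chars.islower c
      · rw [if_pos hl]
        apply List.map_congr_left
        intro b hb
        have hb' : b < cap + 1 := List.mem_range.mp hb
        rw [List.getD_eq_getElem?_getD, List.getElem?_map]
        rw [List.getElem?_range hb']
        simp only [Option.map_some, Option.getD_some]
        rcases Nat.eq_zero_or_pos b with rfl | hbpos
        · rw [fI, if_neg (by simp), if_neg (by omega)]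
          simp
        · have hb1 : b - 1 < cap + 1 := by omega
          rw [List.getD_eq_getElem?_getD, List.getElem?_map, List.getElem?_range hb1]
          simp only [Option.map_some, Option.getD_some]
          rw [if_pos hbpos, fI, if_pos ⟨hl, by exact_mod_cast hbpos⟩]
          have : ((b - 1 : Nat) : Int) = (b : Int) - 1 := by omega
          rw [this]
      · rw [if_neg hl, List.map_map]
        apply List.map_congr_left
        intro b _
        simp only [Function.comp_apply]
        rw [fI, if_neg (by intro hc; exact hl hc.1)]

lemma fI_cap (cs : List Char) (r : Int) :
    fI cs r = fI cs ((max 0 (min r (cs.countP (fun c => PySem.Chars.islower c) : Int))).toNat : Int) := by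
  set cnt : Int := (cs.countP (fun c => PySem.Chars.islower c) : Int) with hcnt
  have hcnt0 : 0 ≤ cnt := by positivity
  rcases le_or_gt r 0 with hr | hr
  · have h1 : ((max 0 (min r cnt)).toNat : Int) = 0 := by omega
    rw [h1, fI_nonpos cs r hr, fI_nonpos cs 0 le_rfl]
  · rcases le_or_gt r cnt with hrc | hrc
    · have h1 : ((max 0 (min r cnt)).toNat : Int) = r := by omega
      rw [h1]
    · have h1 : ((max 0 (min r cnt)).toNat : Int) = cnt := by omega
      rw [h1, fI_ge cs r (by omega)]

-- ===== VERDICT (by name: the statement is the Claim_ definition above) =====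
lemma ofList_injective : Function.Injective String.ofList := by
  intro a b hab
  rw [← String.toList_ofList (l := a), hab, String.toList_ofList]

theorem generate_all_maj_spec : Claim_equal_generate_all_maj := by
  intro passwd rr gp _
  unfold Spec_generate_all_maj
  -- A's side: the DFS visits exactly the fI-ordered variants
  have hA : generate_all_maj passwd rr gp =
      ((fI passwd.toList rr).map String.ofList).filter (fun v => !(gp.contains v)) := by
    unfold generate_all_maj
    have h0 := visit_main gp passwd.toList [] rr PySem.Set.empty
    rw [show String.ofList ([] ++ passwd.toList) = passwd by simp [String.ofList_toList]] at h0
    rw [show ((([] : List Char)).length : Int) = 0 by simp] at h0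
    have hmap : (fI passwd.toList rr).map (fun t => String.ofList ([] ++ t)) =
        (fI passwd.toList rr).map String.ofList := by
      apply List.map_congr_left
      intro t _
      simp
    rw [hmap] at h0
    rw [h0, sFold_eq_filter gp _ PySem.Set.empty
      ((fI_nodup passwd.toList rr).map ofList_injective) (by intro x _; rfl)]
    rfl
  -- B's side
  have hB : generate_all_maj_alt passwd rr gp =
      ((fI passwd.toList rr).map String.ofList).filter (fun v => !(gp.contains v)) := by
    unfold generate_all_maj_alt
    simp only
    rw [bTable]
    set capN : Nat :=
      (max 0 (min rr ((passwd.toList.countP (fun c => PySem.Chars.islower c) : Int)))).toNat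
      with hcap
    rw [List.getD_eq_getElem?_getD, List.getElem?_map, List.getElem?_range (by omega)]
    simp only [Option.map_some, Option.getD_some]
    rw [← fI_cap passwd.toList rr]
    apply PySem.Set.ofList_eq_self_of_nodup
    exact (((fI_nodup passwd.toList rr).map ofList_injective).filter _)
  rw [hA, hB]
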